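-- pv_equiv track=rewrite | github.com/pypi-data/pypi-mirror-320 | packages/fast2app/fast2app-1.2.2-py3-none-any.whl/fast2app/parsing/validity_checks.py | _find_duplicates_with_counts
-- ===== SOURCE A (Python) =====
-- def _find_duplicates_with_counts(input_list: list[str]) -> dict[str, int]:
--     """
--     Returns the duplicates and their number of occurrences in the input list.
--
--     Args:
--         input_list (list[str]): _description_
--
--     Returns:
--         dict[str, int]: _description_
--     """
--     element_count = {}
--     duplicates = {}
--
--     # Count occurrences of each element
--     for item in input_list:
--         element_count[item] = element_count.get(item, 0) + 1
--
--     # Find elements that appear more than once and store their counts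
--     for item, count in element_count.items():
--         if count > 1:
--             duplicates[item] = count
--
--     return duplicates
-- ===== SOURCE B (Python) =====
-- def _find_duplicates_with_counts(input_list: list[str]) -> dict[str, int]:
--     """Single loop over first occurrences: count each distinct element with
--     list.count and record it immediately when the count exceeds one."""
--     duplicates = {}
--     seen = set()
--     for item in input_list:
--         if item not in seen:
--             seen.add(item)
--             count = input_list.count(item)
--             if count > 1:
--                 duplicates[item] = count
--     return duplicates
-- ===== Notes on version B (the rewrite author's own statement) =====
-- stated objective: alternative
-- what changed: Replaces the two-dict pipeline (count everything into a dict, then filter the items in a second pass) by one loop over first occurrences that counts each distinct element directly with list.count, maintaining a seen-set and emitting a duplicate the moment its count is known; no counting dict exists.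
import Mathlib
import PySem

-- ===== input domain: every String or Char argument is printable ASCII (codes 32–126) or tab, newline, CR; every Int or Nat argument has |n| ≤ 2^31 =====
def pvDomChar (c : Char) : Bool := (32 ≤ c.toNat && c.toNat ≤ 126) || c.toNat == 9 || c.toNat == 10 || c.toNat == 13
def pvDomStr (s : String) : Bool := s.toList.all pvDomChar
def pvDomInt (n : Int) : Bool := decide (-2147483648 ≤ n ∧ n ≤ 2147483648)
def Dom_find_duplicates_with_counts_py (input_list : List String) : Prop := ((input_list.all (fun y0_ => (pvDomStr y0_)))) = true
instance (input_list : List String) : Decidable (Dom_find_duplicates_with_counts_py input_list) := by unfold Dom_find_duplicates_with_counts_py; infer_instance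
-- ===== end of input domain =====

-- B replaces the count-dict-then-filter pipeline with a single loop over first
-- occurrences that counts each distinct element via list.count (alternative
-- decomposition, not faster).

-- ===== PORT A =====
def find_duplicates_with_counts_py (input_list : List String) : List (String × Int) :=
  let element_count : PySem.Dict String Int :=
    input_list.foldl (fun d item => d.insert item (d.getD item 0 + 1)) PySem.Dict.empty
  let duplicates : PySem.Dict String Int :=
    element_count.items.foldl
      (fun dup p => if p.2 > 1 then dup.insert p.1 p.2 else dup) PySem.Dict.empty
  duplicates.items

-- ===== PORT B =====
def find_duplicates_with_counts_py_alt (input_list : List String) : List (String × Int) :=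
  let res :=
    input_list.foldl
      (fun (st : PySem.Set String × PySem.Dict String Int) item =>
        if PySem.Set.contains st.1 item then st
        else
          let seen := PySem.Set.add st.1 item
          let count : Int := (PySem.List.count input_list item : Int)
          if count > 1 then (seen, st.2.insert item count) else (seen, st.2))
      (PySem.Set.empty, PySem.Dict.empty)
  res.2.items

-- ===== PRECONDITION & SPEC =====
def Spec_find_duplicates_with_counts_py (input_list : List String) (out : List (String × Int)) : Prop := out = find_duplicates_with_counts_py_alt input_list
instance (input_list : List String) (out : List (String × Int)) : Decidable (Spec_find_duplicates_with_counts_py input_list out) := by unfold Spec_find_duplicates_with_counts_py; infer_instance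

-- ===== CLAIM (what is proved, stated in full; the proofs are below) =====
def Claim_equal_find_duplicates_with_counts_py : Prop := ∀ (input_list : List String), Dom_find_duplicates_with_counts_py input_list → Spec_find_duplicates_with_counts_py input_list (find_duplicates_with_counts_py input_list)

-- ===== LEMMAS AND PROOFS =====

-- the elements of l not yet in s, in first-occurrence order
def pvNewKeys : List String → List String → List String
  | _, [] => []
  | s, x :: xs =>
    if s.contains x then pvNewKeys s xs else x :: pvNewKeys (PySem.Set.add s x) xs

lemma pvFoldl_add_eq (l : List String) : ∀ (s : List String),
    l.foldl PySem.Set.add s = s ++ pvNewKeys s l := by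
  induction l with
  | nil => intro s; simp [pvNewKeys]
  | cons x xs ih =>
    intro s
    by_cases h : x ∈ s
    · simp [pvNewKeys, h, List.foldl_cons, ih]
    · have hc : s.contains x = false := by simpa using h
      simp only [pvNewKeys, hc, List.foldl_cons, PySem.Set.add_of_not_mem h,
        Bool.false_eq_true, if_false, ih]
      simp

lemma pvOfList_eq_newKeys (l : List String) :
    PySem.Set.ofList l = pvNewKeys [] l := by
  rw [PySem.Set.ofList_eq_foldl, pvFoldl_add_eq l []]; simp

lemma pvFoldA (ps : List (String × Int)) : ∀ (d : PySem.Dict String Int),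
    (ps.map Prod.fst).Nodup → (∀ p ∈ ps, d.contains p.1 = false) →
    (ps.foldl (fun dup p => if p.2 > 1 then dup.insert p.1 p.2 else dup) d).items
      = d.items ++ ps.filter (fun p => decide (p.2 > 1)) := by
  induction ps with
  | nil => intro d _ _; simp
  | cons p ps ih =>
    intro d hnd hfresh
    simp only [List.map_cons, List.nodup_cons] at hnd
    by_cases h : p.2 > 1
    · have hpc : d.contains p.1 = false := hfresh p (by simp)
      have hitems : (d.insert p.1 p.2).items = d.items ++ [(p.1, p.2)] :=
        PySem.Dict.items_insert_of_not_contains _ _ hpc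
      have hfresh' : ∀ q ∈ ps, (d.insert p.1 p.2).contains q.1 = false := by
        intro q hq
        rw [PySem.Dict.contains_insert]
        have h1 : q.1 ≠ p.1 := fun he => hnd.1 (he ▸ List.mem_map_of_mem hq)
        simp [h1, hfresh q (by simp [hq])]
      simp only [List.foldl_cons, if_pos h, ih _ hnd.2 hfresh', hitems,
        List.filter_cons, decide_eq_true h]
      simp
    · simp only [List.foldl_cons, if_neg h,
        ih _ hnd.2 (fun q hq => hfresh q (by simp [hq])), List.filter_cons]
      simp [h]

lemma pvFoldB (L : List String) (l : List String) : ∀ (s : PySem.Set String)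
    (d : PySem.Dict String Int), (∀ k, d.contains k = true → k ∈ s) →
    (l.foldl
      (fun (st : PySem.Set String × PySem.Dict String Int) item =>
        if PySem.Set.contains st.1 item then st
        else
          let seen := PySem.Set.add st.1 item
          let count : Int := (PySem.List.count L item : Int)
          if count > 1 then (seen, st.2.insert item count) else (seen, st.2))
      (s, d)).2.items
      = d.items ++ ((pvNewKeys s l).map (fun k => (k, (PySem.List.count L k : Int)))).filter
          (fun p => decide (p.2 > 1)) := by
  induction l with
  | nil => intro s d _; simp [pvNewKeys]
  | cons x xs ih =>
    intro s d hd
    by_cases h : x ∈ s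
    · have hc : PySem.Set.contains s x = true := (PySem.Set.contains_iff s x).mpr h
      simp only [List.foldl_cons, hc, if_pos, pvNewKeys, ih s d hd]
      simp [h]
    · have hc : PySem.Set.contains s x = false := by
        rw [← Bool.not_eq_true, (PySem.Set.contains_iff s x)]; exact h
      have hxd : d.contains x = false := by
        by_contra hb
        exact h (hd x (by revert hb; cases d.contains x <;> simp))
      by_cases hcnt : ((PySem.List.count L x : Int) > 1)
      · have hitems : (d.insert x (PySem.List.count L x : Int)).items
            = d.items ++ [(x, (PySem.List.count L x : Int))] :=
          PySem.Dict.items_insert_of_not_contains _ _ hxd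
        have hd' : ∀ k, (d.insert x (PySem.List.count L x : Int)).contains k = true
            → k ∈ PySem.Set.add s x := by
          intro k hk
          rw [PySem.Dict.contains_insert] at hk
          rcases Bool.or_eq_true_iff.mp hk with hk | hk
          · exact (PySem.Set.mem_add s x k).mpr (Or.inr (by simpa using hk))
          · exact (PySem.Set.mem_add s x k).mpr (Or.inl (hd k hk))
        simp only [List.foldl_cons, hc, Bool.false_eq_true, if_false, if_pos hcnt,
          ih (PySem.Set.add s x) _ hd', hitems, pvNewKeys]
        simp only [PySem.List.count_eq] at hcnt
        simp [h, hcnt]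
      · have hd' : ∀ k, d.contains k = true → k ∈ PySem.Set.add s x :=
          fun k hk => (PySem.Set.mem_add s x k).mpr (Or.inl (hd k hk))
        simp only [List.foldl_cons, hc, Bool.false_eq_true, if_false, if_neg hcnt,
          ih (PySem.Set.add s x) _ hd', pvNewKeys]
        simp only [PySem.List.count_eq] at hcnt
        simp [h, hcnt]

-- ===== VERDICT (by name: the statement is the Claim_ definition above) =====
theorem find_duplicates_with_counts_py_spec : Claim_equal_find_duplicates_with_counts_py := by
  intro L _
  unfold Spec_find_duplicates_with_counts_py
  have eA : find_duplicates_with_counts_py L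
      = ((PySem.Dict.counter L).items.foldl
          (fun dup p => if p.2 > 1 then dup.insert p.1 p.2 else dup)
          PySem.Dict.empty).items := rfl
  have eB : find_duplicates_with_counts_py_alt L
      = (PySem.Dict.empty : PySem.Dict String Int).items
          ++ ((pvNewKeys [] L).map (fun k => (k, (PySem.List.count L k : Int)))).filter
              (fun p => decide (p.2 > 1)) :=
    pvFoldB L L [] PySem.Dict.empty (by simp)
  rw [eA, eB, PySem.Dict.items_counter,
    pvFoldA ((PySem.Set.ofList L).map (fun k => (k, (L.count k : Int))))
      PySem.Dict.empty
      (by simp only [List.map_map]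
          exact List.Nodup.map (fun a b h => by simpa [Function.comp] using h) (PySem.Set.nodup_ofList L))
      (by simp)]
  simp [pvOfList_eq_newKeys, PySem.List.count_eq]
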